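-- pv_equiv track=rewrite | github.com/Druk-Drink/djibouti-sar-timeseries | download_sar.py | get_best_orbits
-- ===== SOURCE A (Python) =====
-- def get_best_orbits(orbit_stats):
--     """
--     Select the best ascending and descending orbits based on coverage.
--     """
--     best_asc = None
--     best_desc = None
--     max_asc = 0
--     max_desc = 0
--
--     for orbit, stats in orbit_stats.items():
--         if stats['ASCENDING'] > max_asc:
--             max_asc = stats['ASCENDING']
--             best_asc = orbit
--         if stats['DESCENDING'] > max_desc:
--             max_desc = stats['DESCENDING']
--             best_desc = orbit
--
--     return best_asc, best_desc
-- ===== SOURCE B (Python) =====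
-- def get_best_orbits(orbit_stats):
--     """
--     Select the best ascending and descending orbits based on coverage.
--     """
--     def best(key):
--         cands = [(o, s[key]) for o, s in orbit_stats.items() if s[key] > 0]
--         return max(cands, key=lambda t: t[1])[0] if cands else None
--
--     return best('ASCENDING'), best('DESCENDING')
-- ===== Notes on version B (the rewrite author's own statement) =====
-- stated objective: idiomatic
-- what changed: Replaces the single four-variable accumulating loop with two independent per-key passes: filter the (orbit, coverage) pairs with positive coverage and take max(..., key=coverage)[0], relying on max() returning the first maximal element; None when no positive coverage.
import Mathlib
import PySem

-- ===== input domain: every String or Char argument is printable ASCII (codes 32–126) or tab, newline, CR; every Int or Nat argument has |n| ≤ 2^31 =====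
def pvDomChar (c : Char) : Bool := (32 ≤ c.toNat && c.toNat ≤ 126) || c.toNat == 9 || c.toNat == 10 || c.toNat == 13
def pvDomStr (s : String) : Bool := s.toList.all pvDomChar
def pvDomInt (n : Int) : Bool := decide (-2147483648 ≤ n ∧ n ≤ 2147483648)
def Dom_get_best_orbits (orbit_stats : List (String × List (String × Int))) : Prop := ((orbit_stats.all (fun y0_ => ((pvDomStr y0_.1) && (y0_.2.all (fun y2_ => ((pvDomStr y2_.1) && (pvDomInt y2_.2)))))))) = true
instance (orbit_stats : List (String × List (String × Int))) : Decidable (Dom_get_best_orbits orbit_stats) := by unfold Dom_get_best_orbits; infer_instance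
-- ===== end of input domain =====

-- B replaces A's single four-variable accumulating loop with two independent per-key
-- passes (filter positive coverages, then first-maximal max); objective: idiomatic.

-- ===== PORT A =====
-- stats[k] : first-match lookup in the association list; Python raises KeyError when
-- the key is absent — those inputs are excluded by Pre_get_best_orbits below.
def pvGetKey (s : List (String × Int)) (k : String) : Int :=
  match s.find? (fun p => p.1 == k) with
  | some p => p.2
  | none => 0

-- one iteration of A's for-loop over the state (best_asc, best_desc, max_asc, max_desc)
def pvStepA (st : Option String × Option String × Int × Int)
    (e : String × List (String × Int)) : Option String × Option String × Int × Int :=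
  let a := pvGetKey e.2 "ASCENDING"
  let d := pvGetKey e.2 "DESCENDING"
  let st1 := if st.2.2.1 < a then (some e.1, st.2.1, a, st.2.2.2) else st
  if st1.2.2.2 < d then (st1.1, some e.1, st1.2.2.1, d) else st1

def get_best_orbits (orbit_stats : List (String × List (String × Int))) :
    Option String × Option String :=
  let r := orbit_stats.foldl pvStepA (none, none, 0, 0)
  (r.1, r.2.1)

-- ===== PORT B =====
-- best(key): candidates with positive coverage, then first-maximal max(...)[0]
def pvBestFor (orbit_stats : List (String × List (String × Int))) (k : String) :
    Option String :=
  let cands := (orbit_stats.map (fun e => (e.1, pvGetKey e.2 k))).filter (fun t => t.2 > 0)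
  match PySem.List.max? cands (fun t => t.2) with
  | some t => some t.1
  | none => none

def get_best_orbits_alt (orbit_stats : List (String × List (String × Int))) :
    Option String × Option String :=
  (pvBestFor orbit_stats "ASCENDING", pvBestFor orbit_stats "DESCENDING")

-- ===== PRECONDITION & SPEC =====
-- Pre_ excludes exactly the inputs where some stats dict lacks the key
-- 'ASCENDING' or 'DESCENDING', on which Python A raises KeyError.
def Pre_get_best_orbits (orbit_stats : List (String × List (String × Int))) : Prop :=
  ∀ p ∈ orbit_stats, "ASCENDING" ∈ p.2.map Prod.fst ∧ "DESCENDING" ∈ p.2.map Prod.fst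
instance (orbit_stats : List (String × List (String × Int))) : Decidable (Pre_get_best_orbits orbit_stats) := by unfold Pre_get_best_orbits; infer_instance

def pvWitness_get_best_orbits : (List (String × List (String × Int))) :=
  [("o12", [("ASCENDING", 2), ("DESCENDING", 0)]), ("o34", [("ASCENDING", 1), ("DESCENDING", 5)])]

def Spec_get_best_orbits (orbit_stats : List (String × List (String × Int))) (out : Option String × Option String) : Prop := out = get_best_orbits_alt orbit_stats
instance (orbit_stats : List (String × List (String × Int))) (out : Option String × Option String) : Decidable (Spec_get_best_orbits orbit_stats out) := by unfold Spec_get_best_orbits; infer_instance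

-- ===== CLAIM (what is proved, stated in full; the proofs are below) =====
def Claim_equal_get_best_orbits : Prop := ∀ (orbit_stats : List (String × List (String × Int))), Dom_get_best_orbits orbit_stats → Pre_get_best_orbits orbit_stats → Spec_get_best_orbits orbit_stats (get_best_orbits orbit_stats)

-- ===== LEMMAS AND PROOFS =====

-- plain running-max step (first maximal wins)
def pvG (u v : String × Int) : String × Int := if u.2 < v.2 then v else u

-- max(a :: c) with key snd is the plain running max from a (first maximal wins)
theorem pv_fold_some (c : List (String × Int)) (a : String × Int) :
    PySem.List.max? (a :: c) (fun x => x.2) = some (c.foldl pvG a) := by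
  induction c generalizing a with
  | nil => rfl
  | cons x c ih =>
      have h : PySem.List.max? (a :: x :: c) (fun y => y.2)
          = PySem.List.max? ((if a.2 < x.2 then x else a) :: c) (fun y => y.2) := by
        simp only [PySem.List.max?, List.foldl]
        split <;> rfl
      rw [h, ih]
      rfl

-- raising the filter threshold from m to x.2 does not change the running max from x
theorem pv_raise (L : List (String × Int)) (x : String × Int) (m : Int) (h : m ≤ x.2) :
    (L.filter (fun t => m < t.2)).foldl pvG x
      = (L.filter (fun t => x.2 < t.2)).foldl pvG x := by
  induction L generalizing x m with
  | nil => rfl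
  | cons t L ih =>
      by_cases h1 : m < t.2
      · by_cases h2 : x.2 < t.2
        · simp only [List.filter, h1, h2, decide_true, List.foldl, pvG, if_true]
          rw [ih t m (le_of_lt h1), ih t x.2 (le_of_lt h2)]
        · have : ((fun t => decide (x.2 < t.2)) t) = false := by simp [h2]
          simp only [List.filter, h1, decide_true, this, List.foldl, pvG, if_neg h2]
          exact ih x m h
      · have h2 : ¬ x.2 < t.2 := fun hc => h1 (lt_of_le_of_lt h hc)
        have e1 : ((fun t => decide (m < t.2)) t) = false := by simp [h1]
        have e2 : ((fun t => decide (x.2 < t.2)) t) = false := by simp [h2]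
        simp only [List.filter, e1, e2]
        exact ih x m h

-- one channel of A's loop
def pvChan (f : String × List (String × Int) → Int)
    (l : List (String × List (String × Int))) (st : Option String × Int) :
    Option String × Int :=
  l.foldl (fun st e => if st.2 < f e then (some e.1, f e) else st) st

-- A's channel fold equals the running max of the filtered candidate list
theorem pv_chanL (f : String × List (String × Int) → Int)
    (l : List (String × List (String × Int))) (b : Option String) (m : Int) :
    pvChan f l (b, m)
      = match (l.map (fun e => (e.1, f e))).filter (fun t => m < t.2) with
        | [] => (b, m)
        | t :: d => (some (d.foldl pvG t).1, (d.foldl pvG t).2) := by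
  induction l generalizing b m with
  | nil => rfl
  | cons e l ih =>
      by_cases h : m < f e
      · simp only [pvChan, List.foldl, if_true, List.map, List.filter, decide_true, h]
        rw [show (l.foldl (fun st e => if st.2 < f e then (some e.1, f e) else st)
              ((some e.1 : Option String), f e)) = pvChan f l (some e.1, f e) from rfl,
            ih (some e.1) (f e)]
        rw [pv_raise (l.map fun e => (e.1, f e)) (e.1, f e) m (le_of_lt h)]
        cases hf : (l.map fun e => (e.1, f e)).filter (fun t => (e.1, f e).2 < t.2) with
        | nil => simp [List.foldl]
        | cons t d =>
            have ht : (e.1, f e).2 < t.2 := by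
              have := List.of_mem_filter (l := (l.map fun e => (e.1, f e)))
                (p := fun t => decide ((e.1, f e).2 < t.2)) (a := t)
                (by rw [hf]; exact List.mem_cons_self)
              simpa using this
            simp only [List.foldl, pvG, if_pos ht]
      · have e1 : ((fun t => decide (m < t.2)) (e.1, f e)) = false := by simp [h]
        simp only [pvChan, List.foldl, if_neg h, List.map, List.filter, e1]
        exact ih b m
-- (proof continues below)

def pvFa (e : String × List (String × Int)) : Int := pvGetKey e.2 "ASCENDING"
def pvFd (e : String × List (String × Int)) : Int := pvGetKey e.2 "DESCENDING"

-- A's four-variable loop splits into the two independent channels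
theorem pv_split (l : List (String × List (String × Int)))
    (ba bd : Option String) (ma md : Int) :
    l.foldl pvStepA (ba, bd, ma, md)
      = ((pvChan pvFa l (ba, ma)).1, (pvChan pvFd l (bd, md)).1,
         (pvChan pvFa l (ba, ma)).2, (pvChan pvFd l (bd, md)).2) := by
  induction l generalizing ba bd ma md with
  | nil => rfl
  | cons e l ih =>
      simp only [List.foldl, pvStepA, pvChan, pvFa, pvFd] at *
      by_cases h1 : ma < pvGetKey e.2 "ASCENDING" <;>
        by_cases h2 : md < pvGetKey e.2 "DESCENDING" <;>
        simp only [h1, h2, if_true, if_false] <;>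
        exact ih _ _ _ _

-- B's per-key pass equals the channel fold from (none, 0)
theorem pv_best (l : List (String × List (String × Int))) (k : String) :
    pvBestFor l k = (pvChan (fun e => pvGetKey e.2 k) l (none, 0)).1 := by
  rw [pv_chanL]
  simp only [pvBestFor]
  cases hf : (l.map fun e => (e.1, pvGetKey e.2 k)).filter (fun t => t.2 > 0) with
  | nil => rfl
  | cons t d => rw [pv_fold_some]

-- ===== VERDICT (by name: the statement is the Claim_ definition above) =====
theorem get_best_orbits_spec : Claim_equal_get_best_orbits := by
  intro os _ _
  show get_best_orbits os = get_best_orbits_alt os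
  simp only [get_best_orbits, get_best_orbits_alt, pv_split, pv_best]
  rfl
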